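-- pv_equiv track=rewrite | github.com/chandu9696/chandu | python practise/hackprc10.py | covbi
-- ===== SOURCE A (Python) =====
-- list1=[1,2,4,8,16,32]
--
-- def covbi(ip):
--     ind=[]
--     ip1=ip
--     while(True):
--         if(ip==0):
--             break
--         if ip in list1:
--             index1=list1.index(ip)
--             ind.append(index1)
--             ip=ip1-ip
--             ip1=ip
--
--         else:
--             ip=ip-1
--     for i in range(len(ind)):
--
--         ind[i]=ind[i]+1
--     return ind
-- ===== SOURCE B (Python) =====
-- def covbi(ip):
--     ind = []
--     remaining = ip
--     for index, power in ((6, 32), (5, 16), (4, 8), (3, 4), (2, 2), (1, 1)):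
--         while remaining >= power:
--             remaining -= power
--             ind.append(index)
--     return ind
-- ===== Notes on version B (the rewrite author's own statement) =====
-- stated objective: faster
-- what changed: Replaces A's repeated one-by-one downward scan over integers (re-scanning after every subtraction) with a single pass over the fixed descending power list [(6,32),...,(1,1)], consuming each power with an inner while loop.
import Mathlib
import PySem

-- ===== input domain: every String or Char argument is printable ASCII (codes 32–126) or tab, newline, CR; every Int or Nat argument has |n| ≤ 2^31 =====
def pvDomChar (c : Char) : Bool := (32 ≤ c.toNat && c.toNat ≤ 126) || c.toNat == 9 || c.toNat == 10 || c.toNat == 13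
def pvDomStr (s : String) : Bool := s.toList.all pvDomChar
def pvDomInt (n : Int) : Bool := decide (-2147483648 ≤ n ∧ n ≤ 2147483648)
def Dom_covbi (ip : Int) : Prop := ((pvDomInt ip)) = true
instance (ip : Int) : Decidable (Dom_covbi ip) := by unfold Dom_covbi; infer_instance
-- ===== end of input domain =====

-- B replaces A's repeated one-by-one downward scan with a single pass over the
-- fixed descending power list, consuming each power with an inner loop (faster).


-- ===== PORT A =====
def list1 : List Int := [1, 2, 4, 8, 16, 32]

-- the 'while(True)' loop of A; state (ind, ip, ip1) exactly as in the Python.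
-- The final 'else' branch (ip < 0) is unreachable in Python (there the loop diverges);
-- it only makes the Lean function total and is excluded by Pre_covbi.
def covbiLoop (ind : List Int) (ip ip1 : Int) : List Int :=
  if ip = 0 then ind
  else if h : ip ∈ list1 then  -- 'if ip in list1'
    let index1 : Int := ((PySem.List.index? list1 ip).getD 0 : Int)
    covbiLoop (ind ++ [index1]) (ip1 - ip) (ip1 - ip)
  else if 0 < ip then covbiLoop ind (ip - 1) ip1
  else ind
termination_by (ip1.toNat, ip.toNat)
decreasing_by
  · have : 1 ≤ ip := by
      simp [list1] at h
      omega
    rcases lt_or_ge 0 ip1 with h1 | h1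
    · exact Prod.Lex.left _ _ (by omega)
    · have e : (ip1 - ip).toNat = ip1.toNat := by omega
      rw [e]
      exact Prod.Lex.right _ (by omega)
  · exact Prod.Lex.right _ (by omega)

def covbi (ip : Int) : List Int :=
  (covbiLoop [] ip ip).map (· + 1)

-- ===== PORT B =====
-- the inner 'while remaining >= power' loop of B; the 'power ≤ 0' guard only makes
-- it total (B only ever calls it with the positive literal powers).
def consume (index power remaining : Int) (ind : List Int) : List Int × Int :=
  if h : power ≤ remaining ∧ 1 ≤ power then
    consume index power (remaining - power) (ind ++ [index])
  else (ind, remaining)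
termination_by remaining.toNat
decreasing_by omega

def pairsB : List (Int × Int) := [(6, 32), (5, 16), (4, 8), (3, 4), (2, 2), (1, 1)]

def covbi_alt (ip : Int) : List Int :=
  (pairsB.foldl (fun st pr => consume pr.1 pr.2 st.2 st.1) ([], ip)).1

-- ===== PRECONDITION & SPEC =====
-- Pre_ excludes negative ip: there the Python A loops forever (never returns), while B returns [].
def Pre_covbi (ip : Int) : Prop := 0 ≤ ip
instance (ip : Int) : Decidable (Pre_covbi ip) := by unfold Pre_covbi; infer_instance
def pvWitness_covbi : Int := (100)

def Spec_covbi (ip : Int) (out : List Int) : Prop := out = covbi_alt ip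
instance (ip : Int) (out : List Int) : Decidable (Spec_covbi ip out) := by unfold Spec_covbi; infer_instance

-- ===== CLAIM (what is proved, stated in full; the proofs are below) =====
def Claim_equal_covbi : Prop := ∀ (ip : Int), Dom_covbi ip → Pre_covbi ip → Spec_covbi ip (covbi ip)

-- ===== LEMMAS AND PROOFS =====

-- the greedy step: (1-based index, power) of the largest power ≤ n (for n ≥ 1)
def stepIP (n : Int) : Int × Int :=
  if 32 ≤ n then (6, 32)
  else if 16 ≤ n then (5, 16)
  else if 8 ≤ n then (4, 8)
  else if 4 ≤ n then (3, 4)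
  else if 2 ≤ n then (2, 2)
  else (1, 1)

-- canonical greedy decomposition (0-based indices)
def greedy (n : Int) : List Int :=
  if h : n ≤ 0 then []
  else ((stepIP n).1 - 1) :: greedy (n - (stepIP n).2)
termination_by n.toNat
decreasing_by
  have h1 : 1 ≤ (stepIP n).2 ∧ (stepIP n).2 ≤ n := by
    unfold stepIP; split_ifs <;> simp <;> omega
  omega

lemma stepIP_pos (n : Int) (h : 1 ≤ n) : 1 ≤ (stepIP n).2 ∧ (stepIP n).2 ≤ n := by
  unfold stepIP; split_ifs <;> simp <;> omega

lemma greedy_zero : greedy 0 = [] := by unfold greedy; simp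

lemma greedy_step (n : Int) (h : 1 ≤ n) :
    greedy n = ((stepIP n).1 - 1) :: greedy (n - (stepIP n).2) := by
  rw [greedy]; simp [show ¬ n ≤ 0 by omega]

-- A's loop computes the greedy decomposition
lemma covbiLoop_eq_greedy : ∀ N : ℕ, ∀ k n : Int, n.toNat ≤ N → 0 ≤ k → k ≤ n →
    ∀ ind : List Int,
    covbiLoop ind k n =
      ind ++ (if k = 0 then [] else ((stepIP k).1 - 1) :: greedy (n - (stepIP k).2)) := by
  intro N
  induction N with
  | zero =>
    intro k n hN h0 h1 ind
    have hk : k = 0 := by omega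
    subst hk
    rw [covbiLoop]; simp
  | succ N IH =>
    -- inner induction on k.toNat (the downward scan)
    intro k n hN h0 h1 ind
    induction hk : k.toNat using Nat.strong_induction_on generalizing k ind with
    | _ K IHk =>
    subst hk
    by_cases hz : k = 0
    · subst hz; rw [covbiLoop]; simp
    · have hk1 : 1 ≤ k := by omega
      by_cases hmem : k ∈ list1
      · -- hit: k is a power, emit its index and restart at n - k
        have hsk : stepIP k = (((PySem.List.index? list1 k).getD 0 : Int) + 1, k) := by
          simp [list1] at hmem
          rcases hmem with h | h | h | h | h | h <;> subst h <;> decide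
        rw [covbiLoop]
        simp only [hz, if_false, dif_pos hmem]
        have hrec := IH (n - k) (n - k) (by omega) (by omega) (le_refl _)
          (ind ++ [((PySem.List.index? list1 k).getD 0 : Int)])
        rw [hrec, hsk]
        by_cases hnk : n - k = 0
        · simp [hnk, ← greedy_zero]
        · rw [greedy_step (n - k) (by omega)]
          simp [hnk]
      · -- miss: decrement k; stepIP unchanged
        have hs : stepIP (k - 1) = stepIP k := by
          simp [list1] at hmem
          unfold stepIP; split_ifs <;> first | rfl | omega
        have hk2 : 2 ≤ k := by
          by_contra hc
          have hk1' : k = 1 := by omega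
          subst hk1'
          exact hmem (by simp [list1])
        rw [covbiLoop]
        simp only [hz, if_false, dif_neg hmem, if_pos (show (0:Int) < k by omega)]
        rw [IHk (k - 1).toNat (by omega) (k - 1) (by omega) (by omega) ind rfl, hs]
        simp [show ¬ (k - 1 = 0) by omega]

lemma covbi_eq_map_greedy (ip : Int) (h : 0 ≤ ip) :
    covbi ip = (greedy ip).map (· + 1) := by
  unfold covbi
  rw [covbiLoop_eq_greedy ip.toNat ip ip (le_refl _) h (le_refl _) []]
  by_cases hz : ip = 0
  · simp [hz, greedy_zero]
  · rw [greedy_step ip (by omega)]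
    simp [hz]

lemma consume_stop (i p r : Int) (a : List Int) (h : ¬ (p ≤ r ∧ 1 ≤ p)) :
    consume i p r a = (a, r) := by
  rw [consume]; simp [h]

lemma consume_fire (i p r : Int) (a : List Int) (h1 : 1 ≤ p) (h2 : p ≤ r) :
    consume i p r a = consume i p (r - p) (a ++ [i]) := by
  rw [consume]; simp [show p ≤ r ∧ 1 ≤ p from ⟨h2, h1⟩]

-- consume with an accumulator
lemma consume_acc : ∀ R : ℕ, ∀ i p r : Int, r.toNat ≤ R → ∀ a : List Int,
    consume i p r a = (a ++ (consume i p r []).1, (consume i p r []).2) := by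
  intro R
  induction R with
  | zero =>
    intro i p r hR a
    have hno : ¬ (p ≤ r ∧ 1 ≤ p) := by omega
    rw [consume_stop i p r a hno, consume_stop i p r [] hno]
    simp
  | succ R IH =>
    intro i p r hR a
    by_cases hc : 1 ≤ p ∧ p ≤ r
    · rw [consume_fire i p r a hc.1 hc.2, consume_fire i p r [] hc.1 hc.2]
      rw [IH i p (r - p) (by omega) (a ++ [i]), IH i p (r - p) (by omega) ([] ++ [i])]
      simp
    · have hno : ¬ (p ≤ r ∧ 1 ≤ p) := by omega
      rw [consume_stop i p r a hno, consume_stop i p r [] hno]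
      simp

-- the fold of B, with the accumulator pulled out
def runB (L : List (Int × Int)) (r : Int) : List Int × Int :=
  L.foldl (fun st pr => consume pr.1 pr.2 st.2 st.1) ([], r)

lemma covbi_alt_eq_runB (n : Int) : covbi_alt n = (runB pairsB n).1 := rfl

lemma fold_acc : ∀ (L : List (Int × Int)) (st : List Int × Int),
    L.foldl (fun st pr => consume pr.1 pr.2 st.2 st.1) st =
      (st.1 ++ (runB L st.2).1, (runB L st.2).2) := by
  intro L
  induction L with
  | nil => intro st; simp [runB]
  | cons pr L IHL =>
    intro st
    simp only [List.foldl_cons, runB]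
    rw [consume_acc st.2.toNat pr.1 pr.2 st.2 (le_refl _) st.1]
    rw [IHL (st.1 ++ (consume pr.1 pr.2 st.2 []).1, (consume pr.1 pr.2 st.2 []).2),
        IHL (consume pr.1 pr.2 st.2 [])]
    simp [runB]

lemma runB_cons (i p : Int) (L : List (Int × Int)) (r : Int) :
    runB ((i, p) :: L) r =
      ((consume i p r []).1 ++ (runB L (consume i p r []).2).1,
       (runB L (consume i p r []).2).2) := by
  rw [runB, List.foldl_cons]
  exact fold_acc L (consume i p r [])

lemma runB_skip (i p : Int) (L : List (Int × Int)) (r : Int) (h : r < p) :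
    runB ((i, p) :: L) r = runB L r := by
  rw [runB_cons, consume_stop i p r [] (by omega)]
  simp

lemma runB_once (i p : Int) (L : List (Int × Int)) (r : Int)
    (h1 : 1 ≤ p) (h2 : p ≤ r) (h3 : r - p < p) :
    runB ((i, p) :: L) r = (i :: (runB L (r - p)).1, (runB L (r - p)).2) := by
  rw [runB_cons, consume_fire i p r [] h1 h2, consume_stop i p (r - p) ([] ++ [i]) (by omega)]
  simp

lemma runB_head32 (n : Int) (L : List (Int × Int)) (h : 32 ≤ n) :
    runB ((6, 32) :: L) n =
      (6 :: (runB ((6, 32) :: L) (n - 32)).1, (runB ((6, 32) :: L) (n - 32)).2) := by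
  rw [runB_cons, consume_fire 6 32 n [] (by omega) h,
      consume_acc (n - 32).toNat 6 32 (n - 32) (le_refl _) ([] ++ [6])]
  rw [runB_cons]
  simp

lemma covbi_alt_zero : covbi_alt 0 = [] := by
  rw [covbi_alt_eq_runB]
  unfold pairsB
  rw [runB_skip _ _ _ _ (by omega), runB_skip _ _ _ _ (by omega),
      runB_skip _ _ _ _ (by omega), runB_skip _ _ _ _ (by omega),
      runB_skip _ _ _ _ (by omega), runB_skip _ _ _ _ (by omega)]
  simp [runB]

lemma covbi_alt_step (n : Int) (h : 1 ≤ n) :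
    covbi_alt n = (stepIP n).1 :: covbi_alt (n - (stepIP n).2) := by
  rw [covbi_alt_eq_runB, covbi_alt_eq_runB]
  unfold pairsB
  by_cases h32 : 32 ≤ n
  · have hs : stepIP n = (6, 32) := by unfold stepIP; rw [if_pos h32]
    rw [hs]; dsimp only
    rw [runB_head32 n _ h32]
  · by_cases h16 : 16 ≤ n
    · have hs : stepIP n = (5, 16) := by unfold stepIP; rw [if_neg h32, if_pos h16]
      rw [hs]; dsimp only
      rw [runB_skip 6 32 _ n (by omega),
          runB_once 5 16 _ n (by omega) h16 (by omega)]
      dsimp only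
      rw [runB_skip 6 32 _ (n - 16) (by omega), runB_skip 5 16 _ (n - 16) (by omega)]
    · by_cases h8 : 8 ≤ n
      · have hs : stepIP n = (4, 8) := by
          unfold stepIP; rw [if_neg h32, if_neg h16, if_pos h8]
        rw [hs]; dsimp only
        rw [runB_skip 6 32 _ n (by omega), runB_skip 5 16 _ n (by omega),
            runB_once 4 8 _ n (by omega) h8 (by omega)]
        dsimp only
        rw [runB_skip 6 32 _ (n - 8) (by omega), runB_skip 5 16 _ (n - 8) (by omega),
            runB_skip 4 8 _ (n - 8) (by omega)]
      · by_cases h4 : 4 ≤ n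
        · have hs : stepIP n = (3, 4) := by
            unfold stepIP; rw [if_neg h32, if_neg h16, if_neg h8, if_pos h4]
          rw [hs]; dsimp only
          rw [runB_skip 6 32 _ n (by omega), runB_skip 5 16 _ n (by omega),
              runB_skip 4 8 _ n (by omega),
              runB_once 3 4 _ n (by omega) h4 (by omega)]
          dsimp only
          rw [runB_skip 6 32 _ (n - 4) (by omega), runB_skip 5 16 _ (n - 4) (by omega),
              runB_skip 4 8 _ (n - 4) (by omega), runB_skip 3 4 _ (n - 4) (by omega)]
        · by_cases h2 : 2 ≤ n
          · have hs : stepIP n = (2, 2) := by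
              unfold stepIP; rw [if_neg h32, if_neg h16, if_neg h8, if_neg h4, if_pos h2]
            rw [hs]; dsimp only
            rw [runB_skip 6 32 _ n (by omega), runB_skip 5 16 _ n (by omega),
                runB_skip 4 8 _ n (by omega), runB_skip 3 4 _ n (by omega),
                runB_once 2 2 _ n (by omega) h2 (by omega)]
            dsimp only
            rw [runB_skip 6 32 _ (n - 2) (by omega), runB_skip 5 16 _ (n - 2) (by omega),
                runB_skip 4 8 _ (n - 2) (by omega), runB_skip 3 4 _ (n - 2) (by omega),
                runB_skip 2 2 _ (n - 2) (by omega)]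
          · have hs : stepIP n = (1, 1) := by
              unfold stepIP
              rw [if_neg h32, if_neg h16, if_neg h8, if_neg h4, if_neg h2]
            rw [hs]; dsimp only
            rw [runB_skip 6 32 _ n (by omega), runB_skip 5 16 _ n (by omega),
                runB_skip 4 8 _ n (by omega), runB_skip 3 4 _ n (by omega),
                runB_skip 2 2 _ n (by omega),
                runB_once 1 1 _ n (by omega) (by omega) (by omega)]
            dsimp only
            rw [runB_skip 6 32 _ (n - 1) (by omega), runB_skip 5 16 _ (n - 1) (by omega),
                runB_skip 4 8 _ (n - 1) (by omega), runB_skip 3 4 _ (n - 1) (by omega),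
                runB_skip 2 2 _ (n - 1) (by omega), runB_skip 1 1 _ (n - 1) (by omega)]

lemma map_greedy_eq_alt : ∀ N : ℕ, ∀ n : Int, n.toNat ≤ N → 0 ≤ n →
    (greedy n).map (· + 1) = covbi_alt n := by
  intro N
  induction N with
  | zero =>
    intro n hN h0
    have : n = 0 := by omega
    subst this
    simp [greedy_zero, covbi_alt_zero]
  | succ N IH =>
    intro n hN h0
    by_cases hz : n = 0
    · subst hz; simp [greedy_zero, covbi_alt_zero]
    · have h1 : 1 ≤ n := by omega
      obtain ⟨hp1, hp2⟩ := stepIP_pos n h1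
      rw [greedy_step n h1, covbi_alt_step n h1]
      simp only [List.map_cons]
      rw [IH (n - (stepIP n).2) (by omega) (by omega)]
      norm_num

-- ===== VERDICT (by name: the statement is the Claim_ definition above) =====
theorem covbi_spec : Claim_equal_covbi := by
  intro ip _ hpre
  unfold Spec_covbi
  rw [covbi_eq_map_greedy ip hpre, map_greedy_eq_alt ip.toNat ip (le_refl _) hpre]
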